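-- pv_equiv track=rewrite | github.com/tanu268/DSA | 19_leaders_in_array_bf.py | find_leaders_brute
-- ===== SOURCE A (Python) =====
-- def find_leaders_brute(nums):
--     n = len(nums)
--     leaders = []
--
--     for i in range(n):
--         is_leader = True
--         # Check if any element to the right is greater
--         for j in range(i + 1, n):
--             if nums[j] > nums[i]:
--                 is_leader = False
--                 break
--         if is_leader:
--             leaders.append(nums[i])
--
--     return leaders
-- ===== SOURCE B (Python) =====
-- def find_leaders_brute(nums):
--     # One right-to-left pass tracking the suffix maximum; O(n) instead of O(n^2).
--     res = []
--     mx = None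
--     for x in reversed(nums):
--         if mx is None or x >= mx:
--             res.append(x)
--         if mx is None or x > mx:
--             mx = x
--     res.reverse()
--     return res
-- ===== Notes on version B (the rewrite author's own statement) =====
-- stated objective: faster
-- what changed: Replaced the nested right-scan per element with a single right-to-left pass that tracks the running suffix maximum and reverses the collected leaders.
import Mathlib
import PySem

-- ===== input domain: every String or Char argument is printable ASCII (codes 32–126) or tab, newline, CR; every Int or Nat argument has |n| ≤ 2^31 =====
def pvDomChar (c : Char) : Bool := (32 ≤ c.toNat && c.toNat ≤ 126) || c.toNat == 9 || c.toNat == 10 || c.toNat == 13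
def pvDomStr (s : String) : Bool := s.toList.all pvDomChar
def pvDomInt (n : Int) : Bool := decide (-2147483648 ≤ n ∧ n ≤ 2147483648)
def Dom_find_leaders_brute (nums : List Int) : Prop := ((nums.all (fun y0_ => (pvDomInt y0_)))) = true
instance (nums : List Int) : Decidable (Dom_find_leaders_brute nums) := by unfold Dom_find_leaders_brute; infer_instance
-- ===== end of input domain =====

-- B replaces A's quadratic per-element right scan by one right-to-left pass
-- tracking the suffix maximum (objective: faster, asymptotic O(n) vs O(n^2)).

-- ===== PORT A =====
-- inner loop 'for j in range(i+1, n): if nums[j] > nums[i]: break' — true iff no later element is greater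
def pvNoGreater (x : Int) : List Int → Bool
  | [] => true
  | y :: ys => if y > x then false else pvNoGreater x ys

-- outer loop over i: recursion over successive suffixes
def find_leaders_brute : List Int → List Int
  | [] => []
  | x :: xs => if pvNoGreater x xs then x :: find_leaders_brute xs else find_leaders_brute xs

-- ===== PORT B =====
-- one loop step of Source B: state (mx, res); res is built in reversed order and reversed at the end
def pvStep (st : Option Int × List Int) (x : Int) : Option Int × List Int :=
  match st with
  | (none, res) => (some x, res ++ [x])
  | (some mx, res) => (if x > mx then some x else some mx, if x ≥ mx then res ++ [x] else res)

def find_leaders_brute_alt (nums : List Int) : List Int :=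
  ((nums.reverse.foldl pvStep (none, [])).2).reverse

-- ===== PRECONDITION & SPEC =====
def Spec_find_leaders_brute (nums : List Int) (out : List Int) : Prop := out = find_leaders_brute_alt nums
instance (nums : List Int) (out : List Int) : Decidable (Spec_find_leaders_brute nums out) := by unfold Spec_find_leaders_brute; infer_instance

-- ===== CLAIM (what is proved, stated in full; the proofs are below) =====
def Claim_equal_find_leaders_brute : Prop := ∀ (nums : List Int), Dom_find_leaders_brute nums → Spec_find_leaders_brute nums (find_leaders_brute nums)

-- ===== LEMMAS AND PROOFS =====

def pvF (xs : List Int) : Option Int × List Int := xs.foldr (fun x st => pvStep st x) (none, [])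

theorem pvF_eq (nums : List Int) :
    nums.reverse.foldl pvStep (none, []) = pvF nums := by
  simp [pvF, List.foldl_reverse]

-- key invariant: the second component reversed is A's result, and the first component
-- is the maximum of xs (characterised through pvNoGreater)
theorem pvKey (xs : List Int) :
    ((pvF xs).2).reverse = find_leaders_brute xs ∧
      ∀ x : Int, pvNoGreater x xs =
        (match (pvF xs).1 with | none => true | some mx => decide (mx ≤ x)) := by
  induction xs with
  | nil => exact ⟨rfl, fun _ => rfl⟩
  | cons y ys ih =>
    obtain ⟨ih1, ih2⟩ := ih
    have hstep : pvF (y :: ys) = pvStep (pvF ys) y := rfl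
    rcases h : pvF ys with ⟨m, r⟩
    rw [h] at ih1 ih2 hstep
    cases m with
    | none =>
      have hng : pvNoGreater y ys = true := ih2 y
      refine ⟨?_, ?_⟩
      · rw [hstep]
        simp [pvStep, find_leaders_brute, hng, ← ih1]
      · intro x
        rw [hstep]
        have := ih2 x
        by_cases hx : y > x <;>
          simp_all [pvStep, pvNoGreater]
    | some mx =>
      have hng : pvNoGreater y ys = decide (mx ≤ y) := ih2 y
      refine ⟨?_, ?_⟩
      · rw [hstep]
        by_cases hy : mx ≤ y
        · simp [pvStep, find_leaders_brute, hng, hy, ← ih1]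
        · simp [pvStep, find_leaders_brute, hng, hy, ← ih1]
      · intro x
        rw [hstep]
        by_cases hgt : mx < y <;> by_cases hx : x < y <;>
          simp [pvStep, pvNoGreater, hgt, hx, ih2] <;> omega

-- ===== VERDICT (by name: the statement is the Claim_ definition above) =====
theorem find_leaders_brute_spec : Claim_equal_find_leaders_brute := by
  intro nums _
  unfold Spec_find_leaders_brute find_leaders_brute_alt
  rw [pvF_eq]
  exact (pvKey nums).1.symm
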